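-- pv_equiv track=rewrite | github.com/fseasy/OpenKnowledgeRec | scripts/mk_wikipedia/extract_pages/parse_text.py | _paragraph_gen
-- ===== SOURCE A (Python) =====
-- def _paragraph_gen(text):
--     spos = 0
--     while (pos := text.find("\n", spos)) != -1:
--         epos = pos + 1
--         para = text[spos: epos]
--         yield para
--         spos = epos
--     return None
-- ===== SOURCE B (Python) =====
-- def _paragraph_gen(text):
--     parts = text.split("\n")
--     for part in parts[:-1]:
--         yield part + "\n"
-- ===== Notes on version B (the rewrite author's own statement) =====
-- stated objective: simpler
-- what changed: Replaces the find/slice index-tracking while-loop with a single split of the text on the newline separator followed by re-appending the newline to every segment except the trailing remainder.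
import Mathlib
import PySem

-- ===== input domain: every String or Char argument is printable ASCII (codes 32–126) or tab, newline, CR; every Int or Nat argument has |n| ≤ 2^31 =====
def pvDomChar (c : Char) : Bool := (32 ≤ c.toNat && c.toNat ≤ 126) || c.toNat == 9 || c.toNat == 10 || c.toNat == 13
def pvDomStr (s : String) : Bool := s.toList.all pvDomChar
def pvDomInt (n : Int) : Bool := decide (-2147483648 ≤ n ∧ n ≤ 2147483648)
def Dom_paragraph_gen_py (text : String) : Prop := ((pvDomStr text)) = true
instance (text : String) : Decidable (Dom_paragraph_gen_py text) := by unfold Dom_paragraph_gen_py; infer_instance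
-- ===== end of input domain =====

-- B replaces A's find/slice index-tracking scan by one split("\n") plus re-appending "\n"
-- to every piece but the trailing remainder (objective: simpler).

-- ===== PORT A =====
-- A's while-loop: spos is the running start index, pos = text.find("\n", spos);
-- fuel (length+1) only makes the same computation total — each step strictly advances spos.
def pgA_go (text : List Char) (spos : Int) : Nat → List (List Char)
  | 0 => []
  | fuel + 1 =>
    let pos := PySem.Chars.findFrom text ['\n'] spos none
    if pos = -1 then []
    else
      let epos := pos + 1
      PySem.Chars.slice text (some spos) (some epos) :: pgA_go text epos fuel

def paragraph_gen_py (text : String) : List String :=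
  (pgA_go text.toList 0 (text.toList.length + 1)).map String.ofList

-- ===== PORT B =====
-- Source B: parts = text.split("\n"); yield part + "\n" for part in parts[:-1]
def paragraph_gen_py_alt (text : String) : List String :=
  let parts := PySem.Chars.splitOn text.toList ['\n']
  (PySem.List.slice parts none (some (-1))).map (fun p => String.ofList (p ++ ['\n']))

-- ===== PRECONDITION & SPEC =====
def Spec_paragraph_gen_py (text : String) (out : List String) : Prop := out = paragraph_gen_py_alt text
instance (text : String) (out : List String) : Decidable (Spec_paragraph_gen_py text out) := by unfold Spec_paragraph_gen_py; infer_instance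

-- ===== CLAIM (what is proved, stated in full; the proofs are below) =====
def Claim_equal_paragraph_gen_py : Prop := ∀ (text : String), Dom_paragraph_gen_py text → Spec_paragraph_gen_py text (paragraph_gen_py text)

-- ===== LEMMAS AND PROOFS =====

-- reference function: the newline-terminated lines of l (the common value of both ports)
def lines1 : List Char → List (List Char)
  | [] => []
  | c :: cs =>
    if c = '\n' then ['\n'] :: lines1 cs
    else
      match lines1 cs with
      | [] => []
      | p :: ps => (c :: p) :: ps

-- simple structural recursion computing splitOn · ['\n']
def splitAux : List Char → List (List Char)
  | [] => [[]]
  | c :: cs =>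
    if c = '\n' then [] :: splitAux cs
    else
      match splitAux cs with
      | [] => [[c]]   -- unreachable: splitAux is never []
      | p :: ps => (c :: p) :: ps

theorem splitAux_cons_nl (cs : List Char) : splitAux ('\n' :: cs) = [] :: splitAux cs := by
  rw [splitAux]; simp

theorem splitAux_cons_of_ne (c : Char) (cs : List Char) (hc : c ≠ '\n') :
    splitAux (c :: cs) = match splitAux cs with
                         | [] => [[c]]
                         | p :: ps => (c :: p) :: ps := by
  rw [splitAux]; simp [hc]

theorem lines1_cons_nl (cs : List Char) : lines1 ('\n' :: cs) = ['\n'] :: lines1 cs := by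
  rw [lines1]; simp

theorem lines1_cons_of_ne (c : Char) (cs : List Char) (hc : c ≠ '\n') :
    lines1 (c :: cs) = match lines1 cs with
                       | [] => []
                       | p :: ps => (c :: p) :: ps := by
  rw [lines1]; simp [hc]

theorem splitAux_ne_nil (l : List Char) : splitAux l ≠ [] := by
  cases l with
  | nil => simp [splitAux]
  | cons c cs =>
    simp only [splitAux]
    split_ifs
    · simp
    · cases h : splitAux cs <;> simp

theorem singleton_infix_iff (a : Char) (l : List Char) : [a] <:+: l ↔ a ∈ l := by
  constructor
  · intro h; exact List.singleton_sublist.mp h.sublist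
  · intro h
    obtain ⟨s, t, rfl⟩ := List.append_of_mem h
    exact ⟨s, t, by simp⟩

theorem singleton_prefix_iff (a : Char) (l : List Char) : [a] <+: l ↔ l.head? = some a := by
  cases l with
  | nil => simp
  | cons c cs => simp [List.cons_prefix_cons, eq_comm]

theorem lines1_of_no_newline (l : List Char) (h : '\n' ∉ l) : lines1 l = [] := by
  induction l with
  | nil => rfl
  | cons c cs ih =>
    simp only [List.mem_cons, not_or] at h
    simp [lines1, Ne.symm h.1, ih h.2]

theorem lines1_step (j : Nat) : ∀ (d : List Char), j < d.length → d[j]? = some '\n' →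
    (∀ i, i < j → d[i]? ≠ some '\n') →
    lines1 d = d.take (j + 1) :: lines1 (d.drop (j + 1)) := by
  induction j with
  | zero =>
    intro d hj hc _
    cases d with
    | nil => simp at hj
    | cons c cs =>
      simp only [List.getElem?_cons_zero, Option.some.injEq] at hc
      subst hc
      simp [lines1]
  | succ j' ih =>
    intro d hj hc hmin
    cases d with
    | nil => simp at hj
    | cons c cs =>
      have hc0 : c ≠ '\n' := by
        have := hmin 0 (Nat.succ_pos _)
        simpa using this
      have hrec := ih cs (by simpa using hj) (by simpa using hc)
        (fun i hi => by
          have := hmin (i + 1) (by omega)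
          simpa using this)
      simp [lines1, hc0, hrec]

-- ===== A-side: the loop computes lines1 =====
theorem pgA_go_spec : ∀ (fuel : Nat) (l : List Char) (s : Nat), s ≤ l.length →
    l.length - s < fuel → pgA_go l (↑s) fuel = lines1 (l.drop s) := by
  intro fuel
  induction fuel with
  | zero => intro l s _ h; omega
  | succ fuel ih =>
    intro l s hs hfuel
    rw [pgA_go]
    rw [PySem.Chars.findFrom_natCast l ['\n'] s hs]
    by_cases hfind : PySem.Chars.find (l.drop s) ['\n'] = -1
    · rw [if_pos hfind]
      have hnotin : '\n' ∉ l.drop s := by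
        rw [← singleton_infix_iff]
        exact (PySem.Chars.find_eq_neg_one_iff _ _).mp hfind
      exact (lines1_of_no_newline _ hnotin).symm
    · rw [if_neg hfind]
      have hge : 0 ≤ PySem.Chars.find (l.drop s) ['\n'] := by
        have := PySem.Chars.neg_one_le_find (l.drop s) ['\n']
        omega
      set f := PySem.Chars.find (l.drop s) ['\n'] with hf
      set j : Nat := f.toNat with hjdef
      have hfj : f = (j : Int) := by omega
      have hspec := PySem.Chars.find_spec (s := l.drop s) (sub := ['\n']) hge
      have hpre : ['\n'] <+: (l.drop s).drop j := hspec.1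
      have hhd : ((l.drop s).drop j).head? = some '\n' := (singleton_prefix_iff _ _).mp hpre
      have hjlen : j < (l.drop s).length := by
        by_contra hcon
        rw [List.drop_eq_nil_of_le (by omega)] at hhd
        simp at hhd
      have hne : ¬ ((↑s : Int) + f = -1) := by omega
      rw [if_neg hne]
      have heq1 : (↑s : Int) + f + 1 = ((s + j + 1 : Nat) : Int) := by omega
      have hslice : PySem.Chars.slice l (some ↑s) (some ((↑s : Int) + f + 1)) =
          (l.drop s).take (j + 1) := by
        rw [heq1]
        show PySem.List.slice l (some ((s : Nat) : Int)) (some ((s + j + 1 : Nat) : Int)) = _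
        have harith : s + j + 1 - s = j + 1 := by omega
        rw [PySem.List.slice_natCast, harith]
      have hdd : l.drop (s + j + 1) = (l.drop s).drop (j + 1) := by
        simp [List.drop_drop, Nat.add_comm, Nat.add_assoc, Nat.add_left_comm]
      have hrec : pgA_go l ((↑s : Int) + f + 1) fuel = lines1 ((l.drop s).drop (j + 1)) := by
        rw [heq1]
        rw [ih l (s + j + 1) (by simp only [List.length_drop] at hjlen; omega)
          (by simp only [List.length_drop] at hjlen; omega)]
        exact congrArg lines1 hdd
      show PySem.Chars.slice l (some ↑s) (some ((↑s : Int) + f + 1)) ::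
          pgA_go l ((↑s : Int) + f + 1) fuel = lines1 (l.drop s)
      rw [hslice, hrec]
      refine (lines1_step j (l.drop s) hjlen ?_ ?_).symm
      · rw [← List.head?_drop]
        exact hhd
      · intro i hi hcon
        apply hspec.2 i hi
        rw [singleton_prefix_iff, List.head?_drop]
        exact hcon

-- ===== B-side: splitOn.go computes splitAux, and dropLast∘map gives lines1 =====
set_option maxRecDepth 4000 in
theorem splitOn_go_eq : ∀ (fuel : Nat) (l cur : List Char) (acc : List (List Char)),
    l.length < fuel →
    PySem.Chars.splitOn.go ['\n'] fuel l cur acc =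
      acc.reverse ++ (match splitAux l with
                      | [] => []
                      | p :: ps => (cur.reverse ++ p) :: ps) := by
  intro fuel
  induction fuel with
  | zero => intro l cur acc h; omega
  | succ fuel ih =>
    intro l cur acc hl
    cases l with
    | nil =>
      simp [PySem.Chars.splitOn.go, splitAux]
    | cons c rest =>
      rw [PySem.Chars.splitOn.go]
      by_cases hc : c = '\n'
      · subst hc
        rw [if_pos (by simp [List.isPrefixOf])]
        have hdrop : List.drop ['\n'].length ('\n' :: rest) = rest := rfl
        rw [hdrop, ih rest [] _ (by simpa using hl), splitAux_cons_nl]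
        cases h : splitAux rest with
        | nil => exact absurd h (splitAux_ne_nil rest)
        | cons p ps =>
          simp only [List.reverse_cons, List.reverse_nil, List.nil_append,
            List.append_nil, List.append_assoc, List.singleton_append]
      · rw [if_neg (by simp [List.isPrefixOf, Ne.symm hc])]
        rw [ih rest (c :: cur) acc (by simpa using hl), splitAux_cons_of_ne c rest hc]
        cases h : splitAux rest with
        | nil => exact absurd h (splitAux_ne_nil rest)
        | cons p ps =>
          simp only [List.reverse_cons, List.reverse_nil, List.nil_append,
            List.append_nil, List.append_assoc, List.singleton_append]

theorem splitOn_eq_splitAux (l : List Char) :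
    PySem.Chars.splitOn l ['\n'] = splitAux l := by
  rw [PySem.Chars.splitOn, splitOn_go_eq (l.length + 1) l [] [] (by omega)]
  cases h : splitAux l with
  | nil => exact absurd h (splitAux_ne_nil l)
  | cons p ps => simp

theorem splitAux_dropLast_map (l : List Char) :
    ((splitAux l).dropLast).map (fun p => p ++ ['\n']) = lines1 l := by
  induction l with
  | nil => rfl
  | cons c cs ih =>
    by_cases hc : c = '\n'
    · subst hc
      rw [splitAux_cons_nl, lines1_cons_nl,
        List.dropLast_cons_of_ne_nil (splitAux_ne_nil cs)]
      simp [ih]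
    · rw [splitAux_cons_of_ne c cs hc, lines1_cons_of_ne c cs hc]
      cases h : splitAux cs with
      | nil => exact absurd h (splitAux_ne_nil cs)
      | cons p ps =>
        cases ps with
        | nil =>
          rw [h] at ih
          simp at ih
          simp [ih]
        | cons q qs =>
          rw [h] at ih
          rw [List.dropLast_cons_of_ne_nil (by simp)] at ih ⊢
          simp only [List.map_cons] at ih
          rw [← ih]
          simp

-- ===== VERDICT (by name: the statement is the Claim_ definition above) =====
theorem paragraph_gen_py_spec : Claim_equal_paragraph_gen_py := by
  intro text _
  show paragraph_gen_py text = paragraph_gen_py_alt text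
  unfold paragraph_gen_py paragraph_gen_py_alt
  have h0 : (0 : Int) = ((0 : Nat) : Int) := rfl
  rw [h0, pgA_go_spec (text.toList.length + 1) text.toList 0 (by omega) (by omega)]
  rw [splitOn_eq_splitAux]
  simp only [List.drop_zero, PySem.List.slice_to_neg_one, ← splitAux_dropLast_map,
    List.map_map]
  rfl
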